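-- pv_equiv track=rewrite | github.com/rhuanlima/lotopy | source/geographic_analysis.py | get_numbers_by_position
-- ===== SOURCE A (Python) =====
-- def is_moldura(numero):
--     """
--     Verifica se um número está na moldura da cartela.
--
--     MOLDURA inclui:
--     - Primeira linha: 1, 2, 3, 4, 5
--     - Última linha: 21, 22, 23, 24, 25
--     - Colunas laterais: 6, 10, 11, 15, 16, 20
--
--     Args:
--         numero: Número de 1 a 25
--
--     Returns:
--         bool: True se está na moldura, False caso contrário
--     """
--     moldura = {1, 2, 3, 4, 5, 21, 22, 23, 24, 25, 6, 10, 11, 15, 16, 20}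
--     return numero in moldura
--
-- def is_miolo(numero):
--     """
--     Verifica se um número está no miolo da cartela.
--
--     MIOLO inclui: 7, 8, 9, 12, 13, 14, 17, 18, 19
--
--     Args:
--         numero: Número de 1 a 25
--
--     Returns:
--         bool: True se está no miolo, False caso contrário
--     """
--     miolo = {7, 8, 9, 12, 13, 14, 17, 18, 19}
--     return numero in miolo
--
-- def get_line_number(numero):
--     """
--     Retorna o número da linha (1-5) onde o número está localizado.
--
--     Args:
--         numero: Número de 1 a 25
--
--     Returns:
--         int: Número da linha (1 a 5)
--     """
--     if numero < 1 or numero > 25: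
--         return None
--
--     return ((numero - 1) // 5) + 1
--
-- def get_numbers_by_position(numeros):
--     """
--     Organiza os números por suas posições na cartela.
--
--     Args:
--         numeros: Lista de números sorteados
--
--     Returns:
--         dict: Dicionário com listas de números organizados por:
--             - moldura: números na moldura
--             - miolo: números no miolo
--             - linha1, linha2, linha3, linha4, linha5: números em cada linha
--     """
--     moldura_nums = []
--     miolo_nums = []
--     linha1_nums = []
--     linha2_nums = []
--     linha3_nums = []
--     linha4_nums = []
--     linha5_nums = []
--
--     for num in numeros:
--         if is_moldura(num):
--             moldura_nums.append(num)
--         if is_miolo(num):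
--             miolo_nums.append(num)
--
--         linha = get_line_number(num)
--         if linha == 1:
--             linha1_nums.append(num)
--         elif linha == 2:
--             linha2_nums.append(num)
--         elif linha == 3:
--             linha3_nums.append(num)
--         elif linha == 4:
--             linha4_nums.append(num)
--         elif linha == 5:
--             linha5_nums.append(num)
--
--     return {
--         'moldura': sorted(moldura_nums),
--         'miolo': sorted(miolo_nums),
--         'linha1': sorted(linha1_nums),
--         'linha2': sorted(linha2_nums),
--         'linha3': sorted(linha3_nums),
--         'linha4': sorted(linha4_nums),
--         'linha5': sorted(linha5_nums)
--     }
-- ===== SOURCE B (Python) =====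
-- # B: counting approach — build a multiplicity map of the input once, then emit each
-- # bucket by walking its fixed, ascending member list and repeating each member by its
-- # count; no per-element classification and no sorting at all.
-- MOLDURA = (1, 2, 3, 4, 5, 6, 10, 11, 15, 16, 20, 21, 22, 23, 24, 25)
-- MIOLO = (7, 8, 9, 12, 13, 14, 17, 18, 19)
-- LINHAS = ((1, 2, 3, 4, 5), (6, 7, 8, 9, 10), (11, 12, 13, 14, 15),
--           (16, 17, 18, 19, 20), (21, 22, 23, 24, 25))
--
--
-- def get_numbers_by_position(numeros):
--     counts = {}
--     for n in numeros:
--         counts[n] = counts.get(n, 0) + 1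
--
--     def bucket(members):
--         out = []
--         for m in members:
--             out += [m] * counts.get(m, 0)
--         return out
--
--     return {
--         'moldura': bucket(MOLDURA),
--         'miolo': bucket(MIOLO),
--         'linha1': bucket(LINHAS[0]),
--         'linha2': bucket(LINHAS[1]),
--         'linha3': bucket(LINHAS[2]),
--         'linha4': bucket(LINHAS[3]),
--         'linha5': bucket(LINHAS[4]),
--     }
-- ===== Notes on version B (the rewrite author's own statement) =====
-- stated objective: alternative
-- what changed: B replaces A's per-element classification loop plus seven sorts by a counting scheme: it builds a multiplicity dict of the input once and then emits each bucket by walking its fixed ascending member list, repeating each member by its count, so no element is classified and nothing is sorted.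
import Mathlib
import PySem

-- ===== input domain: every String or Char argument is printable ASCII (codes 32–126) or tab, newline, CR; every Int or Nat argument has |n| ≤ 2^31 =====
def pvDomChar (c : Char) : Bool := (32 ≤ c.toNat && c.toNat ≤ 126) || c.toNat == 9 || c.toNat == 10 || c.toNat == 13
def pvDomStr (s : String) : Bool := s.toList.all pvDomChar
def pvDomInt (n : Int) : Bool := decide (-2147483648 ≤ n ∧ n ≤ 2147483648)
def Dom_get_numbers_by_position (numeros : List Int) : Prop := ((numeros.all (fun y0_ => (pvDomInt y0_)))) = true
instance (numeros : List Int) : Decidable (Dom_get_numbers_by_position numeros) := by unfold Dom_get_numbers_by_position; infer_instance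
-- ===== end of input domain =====

-- B counts multiplicities of the input once and emits each bucket from its fixed
-- ascending member list, so A's classification loop and seven sorts disappear
-- (objective: alternative algorithm).

-- ===== PORT A =====
-- Python set literals of ints; 'numero in {…}' = membership in the list of elements.
def pv_moldura : List Int := [1, 2, 3, 4, 5, 21, 22, 23, 24, 25, 6, 10, 11, 15, 16, 20]
def pv_miolo : List Int := [7, 8, 9, 12, 13, 14, 17, 18, 19]

def is_moldura (numero : Int) : Bool := pv_moldura.contains numero
def is_miolo (numero : Int) : Bool := pv_miolo.contains numero

def get_line_number (numero : Int) : Option Int :=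
  if numero < 1 ∨ numero > 25 then none
  else some (PySem.Int.floordiv (numero - 1) 5 + 1)

-- A's seven accumulator variables, as a record
structure PvStateA where
  m : List Int
  mi : List Int
  l1 : List Int
  l2 : List Int
  l3 : List Int
  l4 : List Int
  l5 : List Int
deriving Repr, DecidableEq

-- A's loop body, branches in source order
def pv_step_a (st : PvStateA) (num : Int) : PvStateA :=
  let m := if is_moldura num then st.m ++ [num] else st.m
  let mi := if is_miolo num then st.mi ++ [num] else st.mi
  let linha := get_line_number num
  if linha = some 1 then ⟨m, mi, st.l1 ++ [num], st.l2, st.l3, st.l4, st.l5⟩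
  else if linha = some 2 then ⟨m, mi, st.l1, st.l2 ++ [num], st.l3, st.l4, st.l5⟩
  else if linha = some 3 then ⟨m, mi, st.l1, st.l2, st.l3 ++ [num], st.l4, st.l5⟩
  else if linha = some 4 then ⟨m, mi, st.l1, st.l2, st.l3, st.l4 ++ [num], st.l5⟩
  else if linha = some 5 then ⟨m, mi, st.l1, st.l2, st.l3, st.l4, st.l5 ++ [num]⟩
  else ⟨m, mi, st.l1, st.l2, st.l3, st.l4, st.l5⟩

def get_numbers_by_position (numeros : List Int) : List (String × List Int) :=
  let st := numeros.foldl pv_step_a ⟨[], [], [], [], [], [], []⟩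
  [("moldura", PySem.List.sorted st.m (fun x => x) false),
   ("miolo", PySem.List.sorted st.mi (fun x => x) false),
   ("linha1", PySem.List.sorted st.l1 (fun x => x) false),
   ("linha2", PySem.List.sorted st.l2 (fun x => x) false),
   ("linha3", PySem.List.sorted st.l3 (fun x => x) false),
   ("linha4", PySem.List.sorted st.l4 (fun x => x) false),
   ("linha5", PySem.List.sorted st.l5 (fun x => x) false)]

-- ===== PORT B =====
-- B's module-level constant tuples (ascending member lists of each bucket)
def pvB_MOLDURA : List Int := [1, 2, 3, 4, 5, 6, 10, 11, 15, 16, 20, 21, 22, 23, 24, 25]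
def pvB_MIOLO : List Int := [7, 8, 9, 12, 13, 14, 17, 18, 19]
def pvB_LINHAS : List (List Int) :=
  [[1, 2, 3, 4, 5], [6, 7, 8, 9, 10], [11, 12, 13, 14, 15],
   [16, 17, 18, 19, 20], [21, 22, 23, 24, 25]]

-- counts[n] = counts.get(n, 0) + 1 over the input
def pvB_counts (numeros : List Int) : PySem.Dict Int Int :=
  numeros.foldl (fun d n => d.insert n (d.getD n 0 + 1)) PySem.Dict.empty

-- out += [m] * counts.get(m, 0); the count is ≥ 0, so .toNat is exact here
def pvB_bucket (counts : PySem.Dict Int Int) (members : List Int) : List Int :=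
  members.foldl (fun out m => out ++ List.replicate (counts.getD m 0).toNat m) []

def get_numbers_by_position_alt (numeros : List Int) : List (String × List Int) :=
  let counts := pvB_counts numeros
  [("moldura", pvB_bucket counts pvB_MOLDURA),
   ("miolo", pvB_bucket counts pvB_MIOLO),
   ("linha1", pvB_bucket counts (pvB_LINHAS.getD 0 [])),
   ("linha2", pvB_bucket counts (pvB_LINHAS.getD 1 [])),
   ("linha3", pvB_bucket counts (pvB_LINHAS.getD 2 [])),
   ("linha4", pvB_bucket counts (pvB_LINHAS.getD 3 [])),
   ("linha5", pvB_bucket counts (pvB_LINHAS.getD 4 []))]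

-- ===== PRECONDITION & SPEC =====
def Spec_get_numbers_by_position (numeros : List Int) (out : List (String × List Int)) : Prop := out = get_numbers_by_position_alt numeros
instance (numeros : List Int) (out : List (String × List Int)) : Decidable (Spec_get_numbers_by_position numeros out) := by unfold Spec_get_numbers_by_position; infer_instance

-- ===== CLAIM (what is proved, stated in full; the proofs are below) =====
def Claim_equal_get_numbers_by_position : Prop := ∀ (numeros : List Int), Dom_get_numbers_by_position numeros → Spec_get_numbers_by_position numeros (get_numbers_by_position numeros)

-- ===== LEMMAS AND PROOFS =====

-- the per-line membership predicate (characterisation of A's loop)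
def pv_line (i : Int) (n : Int) : Bool := decide (get_line_number n = some i)

lemma pv_step_a_eq (st : PvStateA) (n : Int) :
    pv_step_a st n =
      ⟨(if is_moldura n then st.m ++ [n] else st.m),
       (if is_miolo n then st.mi ++ [n] else st.mi),
       (if pv_line 1 n then st.l1 ++ [n] else st.l1),
       (if pv_line 2 n then st.l2 ++ [n] else st.l2),
       (if pv_line 3 n then st.l3 ++ [n] else st.l3),
       (if pv_line 4 n then st.l4 ++ [n] else st.l4),
       (if pv_line 5 n then st.l5 ++ [n] else st.l5)⟩ := by
  by_cases h1 : get_line_number n = some 1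
  · simp [pv_step_a, pv_line, h1]
  · by_cases h2 : get_line_number n = some 2
    · simp [pv_step_a, pv_line, h2]
    · by_cases h3 : get_line_number n = some 3
      · simp [pv_step_a, pv_line, h3]
      · by_cases h4 : get_line_number n = some 4
        · simp [pv_step_a, pv_line, h4]
        · by_cases h5 : get_line_number n = some 5
          · simp [pv_step_a, pv_line, h5]
          · simp [pv_step_a, pv_line, h1, h2, h3, h4, h5]

-- one bucket, one element: conditional append = filter of the cons
lemma pv_app_aux (p : Int → Bool) (n : Int) (acc t : List Int) :
    (if p n then acc ++ [n] else acc) ++ t.filter p = acc ++ (n :: t).filter p := by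
  rw [List.filter_cons]; by_cases h : p n <;> simp [h]

lemma pv_loop_a (ys : List Int) (st : PvStateA) :
    ys.foldl pv_step_a st =
      ⟨st.m ++ ys.filter is_moldura, st.mi ++ ys.filter is_miolo,
       st.l1 ++ ys.filter (pv_line 1), st.l2 ++ ys.filter (pv_line 2),
       st.l3 ++ ys.filter (pv_line 3), st.l4 ++ ys.filter (pv_line 4),
       st.l5 ++ ys.filter (pv_line 5)⟩ := by
  induction ys generalizing st with
  | nil => simp
  | cons n t ih =>
    rw [List.foldl_cons, pv_step_a_eq, ih]
    simp only [pv_app_aux]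

-- B's counting loop is Counter(xs): counts.get(m, 0) = xs.count m
lemma pvB_counts_getD (numeros : List Int) (m : Int) :
    (pvB_counts numeros).getD m 0 = (numeros.count m : Int) := by
  rw [pvB_counts, PySem.Dict.foldl_insert_getD_add_one_eq_counter,
    PySem.Dict.getD_counter]

-- B's bucket loop as a flatMap of replicates
lemma pvB_bucket_eq (numeros : List Int) (ms : List Int) :
    pvB_bucket (pvB_counts numeros) ms =
      ms.flatMap (fun m => List.replicate (numeros.count m) m) := by
  rw [pvB_bucket]
  induction ms using List.reverseRecOn with
  | nil => simp
  | append_singleton t m _ =>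
    simp [List.foldl_append, pvB_counts_getD, List.flatMap_def]

-- count of k in a flatMap of replicates over a Nodup member list
lemma pv_count_flatMap (ms : List Int) (h : ms.Nodup) (cnt : Int → Nat) (k : Int) :
    (ms.flatMap (fun m => List.replicate (cnt m) m)).count k =
      if k ∈ ms then cnt k else 0 := by
  induction ms with
  | nil => simp
  | cons a t ih =>
    simp only [List.flatMap_cons, List.count_append, List.count_replicate,
      ih (List.nodup_cons.mp h).2, List.mem_cons]
    by_cases hk : k = a
    · subst hk
      simp [(List.nodup_cons.mp h).1]
    · simp [hk, Ne.symm hk]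

-- flatMap of replicates over an ascending member list is nondecreasing
lemma pv_pairwise_flatMap (ms : List Int) (h : ms.Pairwise (· < ·)) (cnt : Int → Nat) :
    (ms.flatMap (fun m => List.replicate (cnt m) m)).Pairwise (· ≤ ·) := by
  induction ms with
  | nil => simp
  | cons a t ih =>
    rw [List.flatMap_cons, List.pairwise_append]
    refine ⟨List.pairwise_replicate.mpr (Or.inr le_rfl), ih (List.pairwise_cons.mp h).2, ?_⟩
    intro x hx y hy
    rw [List.eq_of_mem_replicate hx]
    obtain ⟨m, hm, hym⟩ := List.mem_flatMap.mp hy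
    rw [List.eq_of_mem_replicate hym]
    exact le_of_lt ((List.pairwise_cons.mp h).1 m hm)

-- MAIN LEMMA: sorting the elements of xs that lie in an ascending Nodup member
-- list ms equals emitting each member of ms repeated by its count in xs
lemma pv_bucket_main (xs ms : List Int) (h : ms.Pairwise (· < ·)) :
    PySem.List.sorted (xs.filter (fun n => ms.contains n)) (fun x => x) false =
      ms.flatMap (fun m => List.replicate (xs.count m) m) := by
  apply PySem.List.sorted_id_eq_of_perm_of_pairwise
  · rw [List.perm_iff_count]
    intro k
    rw [pv_count_flatMap ms h.nodup (fun m => xs.count m) k]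
    by_cases hk : k ∈ ms
    · rw [if_pos hk, List.count_filter]
      simp [hk]
    · rw [if_neg hk]
      symm
      rw [List.count_eq_zero]
      intro hmem
      exact hk (by simpa using (List.mem_filter.mp hmem).2)
  · exact pv_pairwise_flatMap ms h (fun m => xs.count m)

-- A's seven filter predicates coincide with membership in B's member lists
lemma pv_pred_moldura : is_moldura = fun n => pvB_MOLDURA.contains n := by
  funext n
  simp only [is_moldura, pv_moldura, pvB_MOLDURA, List.contains_eq_mem, List.mem_cons,
    List.not_mem_nil, or_false, decide_eq_decide]
  omega

lemma pv_line_mem (i : Int) (hi : 1 ≤ i ∧ i ≤ 5) (n : Int) :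
    pv_line i n = decide (5 * i - 4 ≤ n ∧ n ≤ 5 * i) := by
  rw [pv_line, get_line_number]
  by_cases h : n < 1 ∨ n > 25
  · rw [if_pos h]
    simp only [decide_eq_decide]
    constructor
    · intro hc; cases hc
    · omega
  · rw [if_neg h,
      PySem.Int.floordiv_eq_ediv_of_pos (by norm_num : (0:Int) < 5)]
    simp only [decide_eq_decide, Option.some_inj]
    omega

lemma pv_pred_linha (i : Int) (hi : 1 ≤ i ∧ i ≤ 5) (ms : List Int)
    (hms : ∀ n, ms.contains n = decide (5 * i - 4 ≤ n ∧ n ≤ 5 * i)) :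
    pv_line i = fun n => ms.contains n := by
  funext n
  rw [pv_line_mem i hi n, hms n]

-- ===== VERDICT (by name: the statement is the Claim_ definition above) =====
theorem get_numbers_by_position_spec : Claim_equal_get_numbers_by_position := by
  intro numeros _
  unfold Spec_get_numbers_by_position get_numbers_by_position get_numbers_by_position_alt
  rw [pv_loop_a]
  have hl1 : pv_line 1 = fun n => ([1,2,3,4,5] : List Int).contains n :=
    pv_pred_linha 1 (by norm_num) _ (by intro n; simp only [List.contains_eq_mem, List.mem_cons, List.not_mem_nil, or_false, decide_eq_decide]; omega)
  have hl2 : pv_line 2 = fun n => ([6,7,8,9,10] : List Int).contains n :=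
    pv_pred_linha 2 (by norm_num) _ (by intro n; simp only [List.contains_eq_mem, List.mem_cons, List.not_mem_nil, or_false, decide_eq_decide]; omega)
  have hl3 : pv_line 3 = fun n => ([11,12,13,14,15] : List Int).contains n :=
    pv_pred_linha 3 (by norm_num) _ (by intro n; simp only [List.contains_eq_mem, List.mem_cons, List.not_mem_nil, or_false, decide_eq_decide]; omega)
  have hl4 : pv_line 4 = fun n => ([16,17,18,19,20] : List Int).contains n :=
    pv_pred_linha 4 (by norm_num) _ (by intro n; simp only [List.contains_eq_mem, List.mem_cons, List.not_mem_nil, or_false, decide_eq_decide]; omega)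
  have hl5 : pv_line 5 = fun n => ([21,22,23,24,25] : List Int).contains n :=
    pv_pred_linha 5 (by norm_num) _ (by intro n; simp only [List.contains_eq_mem, List.mem_cons, List.not_mem_nil, or_false, decide_eq_decide]; omega)
  have hmi : is_miolo = fun n => pvB_MIOLO.contains n := by
    funext n; rw [is_miolo, pv_miolo, pvB_MIOLO]
  simp only [pv_pred_moldura, hmi, hl1, hl2, hl3, hl4, hl5, List.nil_append,
    pvB_LINHAS, List.getD, List.getElem?_cons_zero, List.getElem?_cons_succ,
    Option.getD_some]
  rw [pvB_bucket_eq, pvB_bucket_eq, pvB_bucket_eq, pvB_bucket_eq, pvB_bucket_eq,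
    pvB_bucket_eq, pvB_bucket_eq]
  rw [pv_bucket_main _ _ (by rw [pvB_MOLDURA]; decide),
    pv_bucket_main _ _ (by rw [pvB_MIOLO]; decide),
    pv_bucket_main _ _ (by decide), pv_bucket_main _ _ (by decide),
    pv_bucket_main _ _ (by decide), pv_bucket_main _ _ (by decide),
    pv_bucket_main _ _ (by decide)]
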